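-- pv_equiv track=rewrite | github.com/harrisonized/interview-practice | functions/iterators.py | idx_for_diag_ne_from_tl
-- ===== SOURCE A (Python) =====
-- def idx_for_diag_ne_from_tl(num_rows=2, num_cols=3):
--     """Traverse northeast diagonals from top right
--     Eg.
--           0    1    2
--         //   //   //
--     ['A', 'B', 'C'] 3
--         //   //   //
--     ['D', 'E', 'F']
--
--     Returns row and col indices for: A, D, B, E, C, F
--     """
--     # upper left triangle
--     for row in range(num_rows):
--         col = 0
--         while row >= 0 and col < num_cols:
--             yield row, col
--             row -= 1
--             col += 1
--
--     # lower right triangle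
--     for col in range(1, num_cols):
--         row = num_rows-1
--         while row >= 0 and col < num_cols:
--             yield row, col
--             row -= 1
--             col += 1
-- ===== SOURCE B (Python) =====
-- def idx_for_diag_ne_from_tl(num_rows=2, num_cols=3):
--     """Single pass over anti-diagonal sums s; each diagonal is emitted
--     highest-row-first, merging A's two triangle sweeps into one loop."""
--     for s in range(num_rows + num_cols - 1):
--         for row in range(min(s, num_rows - 1), max(0, s - num_cols + 1) - 1, -1):
--             yield row, s - row
-- ===== Notes on version B (the rewrite author's own statement) =====
-- stated objective: alternative
-- what changed: Replaced A's two separate triangle sweeps (one per starting row, one per starting column) by a single loop over the anti-diagonal sum s with a clamped descending inner range, preserving the exact emission order.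
import Mathlib
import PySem

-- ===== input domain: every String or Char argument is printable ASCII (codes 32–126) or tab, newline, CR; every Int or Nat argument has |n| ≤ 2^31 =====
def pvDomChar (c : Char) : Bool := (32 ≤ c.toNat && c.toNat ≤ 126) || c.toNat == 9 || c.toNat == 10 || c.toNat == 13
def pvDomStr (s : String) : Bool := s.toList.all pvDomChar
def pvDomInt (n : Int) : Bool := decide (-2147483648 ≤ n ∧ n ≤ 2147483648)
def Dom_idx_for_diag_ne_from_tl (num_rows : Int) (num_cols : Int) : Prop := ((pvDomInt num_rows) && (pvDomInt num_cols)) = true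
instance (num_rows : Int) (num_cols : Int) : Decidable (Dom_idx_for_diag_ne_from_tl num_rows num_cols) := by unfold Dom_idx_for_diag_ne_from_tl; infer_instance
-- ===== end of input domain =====

-- B merges A's two triangle sweeps into one loop over the anti-diagonal sum; same output order, same cost (objective: alternative).

-- ===== PORT A =====
-- the inner 'while row >= 0 and col < num_cols: yield row, col; row -= 1; col += 1'
def pvWhileA (num_cols : Int) (row : Int) (col : Int) : List (Int × Int) :=
  if h : 0 ≤ row ∧ col < num_cols then
    (row, col) :: pvWhileA num_cols (row - 1) (col + 1)
  else []
termination_by (row + 1).toNat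
decreasing_by omega

def idx_for_diag_ne_from_tl (num_rows : Int) (num_cols : Int) : List (Int × Int) :=
  -- upper left triangle
  let out1 := (PySem.List.pyRange 0 num_rows 1).foldl
    (fun acc row => acc ++ pvWhileA num_cols row 0) []
  -- lower right triangle
  (PySem.List.pyRange 1 num_cols 1).foldl
    (fun acc col => acc ++ pvWhileA num_cols (num_rows - 1) col) out1

-- ===== PORT B =====
def idx_for_diag_ne_from_tl_alt (num_rows : Int) (num_cols : Int) : List (Int × Int) :=
  (PySem.List.pyRange 0 (num_rows + num_cols - 1) 1).foldl
    (fun acc s => acc ++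
      (PySem.List.pyRange (min s (num_rows - 1)) (max 0 (s - num_cols + 1) - 1) (-1)).map
        (fun row => (row, s - row))) []

-- ===== PRECONDITION & SPEC =====
def Spec_idx_for_diag_ne_from_tl (num_rows : Int) (num_cols : Int) (out : List (Int × Int)) : Prop := out = idx_for_diag_ne_from_tl_alt num_rows num_cols
instance (num_rows : Int) (num_cols : Int) (out : List (Int × Int)) : Decidable (Spec_idx_for_diag_ne_from_tl num_rows num_cols out) := by unfold Spec_idx_for_diag_ne_from_tl; infer_instance

-- ===== CLAIM (what is proved, stated in full; the proofs are below) =====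
def Claim_equal_idx_for_diag_ne_from_tl : Prop := ∀ (num_rows : Int) (num_cols : Int), Dom_idx_for_diag_ne_from_tl num_rows num_cols → Spec_idx_for_diag_ne_from_tl num_rows num_cols (idx_for_diag_ne_from_tl num_rows num_cols)

-- ===== LEMMAS AND PROOFS =====

-- A's while loop is exactly a clamped descending range over the rows of one anti-diagonal.
theorem pvWhileA_eq_range (nc r c : Int) :
    pvWhileA nc r c =
      (PySem.List.pyRange r (max 0 (r + c - nc + 1) - 1) (-1)).map
        (fun row => (row, r + c - row)) := by
  rw [pvWhileA]
  split_ifs with h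
  · rw [PySem.List.pyRange_neg_one_cons (by omega), List.map_cons]
    have ih := pvWhileA_eq_range nc (r - 1) (c + 1)
    rw [show r - 1 + (c + 1) = r + c from by ring] at ih
    rw [ih]
    simp
  · rw [PySem.List.pyRange_neg_one_eq_nil (by omega)]
    simp
termination_by (r + 1).toNat
decreasing_by omega

-- B's inner range term, as a function of the diagonal sum s.
theorem alt_term_nil (nr nc s : Int) (h : nr ≤ 0 ∨ nc ≤ 0) :
    (PySem.List.pyRange (min s (nr - 1)) (max 0 (s - nc + 1) - 1) (-1)).map
      (fun row => (row, s - row)) = ([] : List (Int × Int)) := by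
  rw [PySem.List.pyRange_neg_one_eq_nil (by omega)]
  rfl

theorem idx_for_diag_ne_from_tl_spec' (nr nc : Int) :
    idx_for_diag_ne_from_tl nr nc = idx_for_diag_ne_from_tl_alt nr nc := by
  unfold idx_for_diag_ne_from_tl idx_for_diag_ne_from_tl_alt
  simp only [PySem.List.foldl_append_eq_flatMap, List.nil_append]
  by_cases hdeg : nr ≤ 0 ∨ nc ≤ 0
  · -- degenerate: both sides are []
    rw [List.flatMap_eq_nil_iff.mpr, List.flatMap_eq_nil_iff.mpr,
        List.flatMap_eq_nil_iff.mpr]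
    · simp
    · intro s _hs
      exact alt_term_nil nr nc s hdeg
    · intro col hcol
      rw [PySem.List.mem_pyRange_one] at hcol
      rw [pvWhileA_eq_range, PySem.List.pyRange_neg_one_eq_nil (by omega)]
      rfl
    · intro row hrow
      rw [PySem.List.mem_pyRange_one] at hrow
      rw [pvWhileA_eq_range, PySem.List.pyRange_neg_one_eq_nil (by omega)]
      rfl
  · have hr : 0 < nr := by omega
    have hc : 0 < nc := by omega
    -- split B's diagonal-sum range at s = nr
    rw [PySem.List.pyRange_one_append 0 nr (nr + nc - 1) (by omega) (by omega),
        List.flatMap_append]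
    congr 1
    · -- first triangle: s = row, min s (nr-1) = s
      apply List.flatMap_congr
      intro row hrow
      rw [PySem.List.mem_pyRange_one] at hrow
      rw [pvWhileA_eq_range]
      have hmin : min row (nr - 1) = row := by omega
      rw [hmin]
      simp
    · -- second triangle: s = nr - 1 + col, min s (nr-1) = nr - 1
      rw [PySem.List.pyRange_one, PySem.List.pyRange_one, List.flatMap_map,
          List.flatMap_map]
      have hlen : (nc - 1).toNat = (nr + nc - 1 - nr).toNat := by omega
      rw [hlen]
      apply List.flatMap_congr
      intro k _hk
      rw [pvWhileA_eq_range]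
      have hmin : min (nr + (k : Int)) (nr - 1) = nr - 1 := by omega
      rw [hmin, show nr - 1 + (1 + (k : Int)) = nr + (k : Int) from by ring]

-- ===== VERDICT (by name: the statement is the Claim_ definition above) =====
theorem idx_for_diag_ne_from_tl_spec : Claim_equal_idx_for_diag_ne_from_tl := by
  intro nr nc _
  exact idx_for_diag_ne_from_tl_spec' nr nc
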